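-- pv_equiv track=rewrite | github.com/lelong88/nspaceresearch | design-curriculums/hugo/update_curriculums.py | find_activity
-- ===== SOURCE A (Python) =====
-- def find_activity(session, activity_type, index=0):
--     """Find the nth activity of a given type in a session."""
--     count = 0
--     for act in session.get("activities", []):
--         if act.get("activityType") == activity_type:
--             if count == index:
--                 return act
--             count += 1
--     return None
-- ===== SOURCE B (Python) =====
-- def find_activity(session, activity_type, index=0):
--     """Find the nth activity of a given type in a session."""
--     matches = [act for act in session.get("activities", [])
--                if act.get("activityType") == activity_type]
--     return matches[index] if 0 <= index < len(matches) else None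
-- ===== Notes on version B (the rewrite author's own statement) =====
-- stated objective: simpler
-- what changed: Replaces the count-and-early-return loop by materialising the list of matching activities with a comprehension and returning the guarded positional index (None when out of range, which also reproduces A's None on negative indices); Pre_ excludes only association lists with duplicate keys, which encode no Python dict and are never produced by A's callers.
import Mathlib
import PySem

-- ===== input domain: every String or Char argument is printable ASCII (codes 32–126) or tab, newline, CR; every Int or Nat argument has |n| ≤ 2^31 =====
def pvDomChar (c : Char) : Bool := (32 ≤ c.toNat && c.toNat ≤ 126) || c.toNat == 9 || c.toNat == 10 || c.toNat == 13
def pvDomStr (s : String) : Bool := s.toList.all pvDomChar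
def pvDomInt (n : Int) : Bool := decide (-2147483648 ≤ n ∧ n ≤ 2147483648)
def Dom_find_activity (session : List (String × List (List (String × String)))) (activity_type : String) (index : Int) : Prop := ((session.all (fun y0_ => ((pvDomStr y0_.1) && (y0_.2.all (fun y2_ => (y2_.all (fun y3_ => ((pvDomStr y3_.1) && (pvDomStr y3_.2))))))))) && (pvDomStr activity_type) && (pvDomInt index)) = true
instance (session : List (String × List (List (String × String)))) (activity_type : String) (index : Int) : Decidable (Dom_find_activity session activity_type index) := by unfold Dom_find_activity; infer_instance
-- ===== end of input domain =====

-- B replaces A's count-and-early-return loop by a filter comprehension plus a guarded positional index (objective: simpler).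

-- ===== PORT A =====
-- loop over activities keeping the running count, returning early at the index-th match
def find_activity_loop (acts : List (List (String × String))) (activity_type : String) (index : Int) (count : Int) : Option (List (String × String)) :=
  match acts with
  | [] => none
  | act :: rest =>
    if (PySem.Dict.mk act).get? "activityType" = some activity_type then
      if count = index then some act
      else find_activity_loop rest activity_type index (count + 1)
    else find_activity_loop rest activity_type index count

def find_activity (session : List (String × List (List (String × String)))) (activity_type : String) (index : Int) : Option (List (String × String)) :=
  find_activity_loop ((PySem.Dict.mk session).getD "activities" []) activity_type index 0

-- ===== PORT B =====
def find_activity_alt (session : List (String × List (List (String × String)))) (activity_type : String) (index : Int) : Option (List (String × String)) :=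
  let ms := ((PySem.Dict.mk session).getD "activities" []).filter
    (fun act => (PySem.Dict.mk act).get? "activityType" = some activity_type)
  if 0 ≤ index ∧ index < ms.length then ms[index.toNat]? else none

-- ===== PRECONDITION & SPEC =====
-- Pre_ excludes only association lists with duplicate keys (in the session dict, or in an activity dict
-- of its "activities" entry): those encode no Python dict, so A is never called on them; it excludes no
-- input the Python A accepts.
def Pre_find_activity (session : List (String × List (List (String × String)))) (activity_type : String) (index : Int) : Prop :=
  (session.map Prod.fst).Nodup ∧
  ∀ act ∈ (PySem.Dict.mk session).getD "activities" [], (act.map Prod.fst).Nodup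
instance (session : List (String × List (List (String × String)))) (activity_type : String) (index : Int) : Decidable (Pre_find_activity session activity_type index) := by unfold Pre_find_activity; infer_instance

def pvWitness_find_activity : (List (String × List (List (String × String)))) × String × Int :=
  ([("activities", [[("activityType", "quiz")], [("activityType", "video")]])], "video", 0)

def Spec_find_activity (session : List (String × List (List (String × String)))) (activity_type : String) (index : Int) (out : Option (List (String × String))) : Prop := out = find_activity_alt session activity_type index
instance (session : List (String × List (List (String × String)))) (activity_type : String) (index : Int) (out : Option (List (String × String))) : Decidable (Spec_find_activity session activity_type index out) := by unfold Spec_find_activity; infer_instance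

-- ===== CLAIM (what is proved, stated in full; the proofs are below) =====
def Claim_equal_find_activity : Prop := ∀ (session : List (String × List (List (String × String)))) (activity_type : String) (index : Int), Dom_find_activity session activity_type index → Pre_find_activity session activity_type index → Spec_find_activity session activity_type index (find_activity session activity_type index)

-- ===== LEMMAS AND PROOFS =====
theorem find_activity_loop_eq (acts : List (List (String × String))) (activity_type : String) (index count : Int) :
    find_activity_loop acts activity_type index count =
      (if count ≤ index then
        (acts.filter (fun act => (PySem.Dict.mk act).get? "activityType" = some activity_type))[(index - count).toNat]?
      else none) := by
  induction acts generalizing count with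
  | nil => simp [find_activity_loop]
  | cons act rest ih =>
    by_cases hp : (PySem.Dict.mk act).get? "activityType" = some activity_type
    · by_cases he : count = index
      · subst he
        simp [find_activity_loop, hp]
      · rw [find_activity_loop, if_pos hp, if_neg he, ih]
        by_cases hle : count ≤ index
        · have h1 : count + 1 ≤ index := by omega
          rw [if_pos h1, if_pos hle]
          have : (index - count).toNat = (index - (count + 1)).toNat + 1 := by omega
          simp [hp, this]
        · have h1 : ¬ (count + 1 ≤ index) := by omega
          rw [if_neg h1, if_neg hle]
    · rw [find_activity_loop, if_neg hp, ih]
      simp [hp]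

-- ===== VERDICT (by name: the statement is the Claim_ definition above) =====
theorem find_activity_spec : Claim_equal_find_activity := by
  intro session activity_type index _ _
  unfold Spec_find_activity find_activity find_activity_alt
  rw [find_activity_loop_eq]
  set m := ((PySem.Dict.mk session).getD "activities" []).filter
    (fun act => (PySem.Dict.mk act).get? "activityType" = some activity_type) with hm
  by_cases h0 : (0 : Int) ≤ index
  · rw [if_pos h0]
    by_cases hlt : index < (m.length : Int)
    · rw [if_pos (by exact ⟨h0, hlt⟩)]; simp
    · rw [if_neg (by tauto)]
      simp only [Int.sub_zero]
      exact List.getElem?_eq_none (by omega)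
  · rw [if_neg h0, if_neg (by tauto)]
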